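-- pv_equiv track=rewrite | github.com/pimmie001/Structy | exhaustive recursion/parenthetical_possibilities.py | parenthetical_possibilities
-- ===== SOURCE A (Python) =====
-- def parenthetical_possibilities(string):
--     if not '(' in string:
--         return [string]
--
--
--     for i in range(len(string)):
--         item = string[i]
--         if item == '(':
--             start = i
--         elif item == ')':
--             end = i
--             break
--
--     results = []
--     for letter in string[start+1:end]:
--         new_string = string[:start] + letter + string[end+1:]
--         sub_result = parenthetical_possibilities(new_string)
--         results.extend(sub_result)
--
--     return results
-- ===== SOURCE B (Python) =====
-- def _children(s):
--     end = s.index(')')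
--     start = s.rindex('(', 0, end)
--     return [s[:start] + letter + s[end + 1:] for letter in s[start + 1:end]]
--
-- def parenthetical_possibilities(string):
--     results = []
--     stack = [string]
--     while stack:
--         s = stack.pop()
--         if '(' not in s:
--             results.append(s)
--         else:
--             stack.extend(reversed(_children(s)))
--     return results
-- ===== Notes on version B (the rewrite author's own statement) =====
-- stated objective: alternative
-- what changed: B replaces A's recursion with an explicit LIFO stack of pending strings (children pushed in reverse to keep A's DFS leaf order) and locates the group with str.index/str.rindex instead of A's per-character scan loop.
import Mathlib
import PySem

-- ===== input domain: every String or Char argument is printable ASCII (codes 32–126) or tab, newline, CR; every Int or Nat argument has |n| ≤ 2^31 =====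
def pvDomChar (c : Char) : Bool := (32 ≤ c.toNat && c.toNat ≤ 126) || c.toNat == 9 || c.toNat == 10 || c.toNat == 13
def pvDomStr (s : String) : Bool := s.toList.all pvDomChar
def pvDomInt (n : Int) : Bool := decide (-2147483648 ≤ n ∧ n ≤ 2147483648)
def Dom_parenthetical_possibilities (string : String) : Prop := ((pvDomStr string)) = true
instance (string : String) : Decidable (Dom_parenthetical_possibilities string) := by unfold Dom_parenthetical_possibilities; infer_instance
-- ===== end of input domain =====

-- B replaces A's recursion by an explicit stack-based DFS loop using str.index/str.rindex
-- to locate the group (objective: alternative decomposition, same cost).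


-- ===== PORT A =====
-- A's index loop: walks i over the chars, records the last '(' seen in `st0` and breaks at
-- the first ')'; returns (the recorded start, some end) at the break, or (start, none) if
-- the loop runs out (Python: `end` stays unbound there → NameError, outside Pre_).
def pvFindA : List Char → Nat → Option Nat → Option Nat × Option Nat
  | [], _, st0 => (st0, none)
  | c :: cs, i, st0 =>
    if c = '(' then pvFindA cs (i + 1) (some i)
    else if c = ')' then (st0, some i)
    else pvFindA cs (i + 1) st0

-- A's recursion, with a structural fuel guard for totality: every recursive call is on a
-- strictly shorter list (the span start..end is replaced by one letter), so fuel
-- l.length + 1 never runs out (proved below, pvPossAF_stable); fuel 0 is unreachable.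
def pvPossAF : Nat → List Char → List (List Char)
  | 0, _ => []
  | fuel + 1, l =>
    if l.contains '(' = false then [l]
    else
      match pvFindA l 0 none with
      | (some st, some en) =>
        ((PySem.List.slice l (some ((st : Int) + 1)) (some (en : Int))).map
          (fun letter =>
            pvPossAF fuel (PySem.List.slice l none (some (st : Int)) ++ [letter] ++
                           PySem.List.slice l (some ((en : Int) + 1)) none))).flatten
      | _ => []  -- Python raises NameError here (start or end unbound); outside Pre_

def parenthetical_possibilities (string : String) : List String :=
  (pvPossAF (string.toList.length + 1) string.toList).map String.ofList

-- ===== PORT B =====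
-- B's helper _children: s.index(')'), s.rindex('(',0,end), then the comprehension.
-- Where Python's index/rindex raises ValueError (outside Pre_) the port yields [] (the
-- loop then simply drops the string, a don't-care outside Pre_).
def pvChildrenB (s : List Char) : List (List Char) :=
  match s.idxOf? ')' with
  | none => []
  | some en =>
    match (s.take en).reverse.idxOf? '(' with
    | none => []
    | some k =>
      ((s.drop (en - 1 - k + 1)).take (en - (en - 1 - k + 1))).map
        (fun letter => s.take (en - 1 - k) ++ [letter] ++ s.drop (en + 1))

-- B's stack loop; the stack is a list with its head as the top (Python pops from the end
-- and pushes the children reversed, so the next popped strings are the children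
-- left-to-right: here that is exactly prepending the children in order). Structural fuel
-- guard for totality: each step strictly decreases the sum of 2^length over the stack
-- (proved below), so fuel 2^(length+1) never runs out; fuel 0 is unreachable.
def pvLoopBF : Nat → List (List Char) → List (List Char) → List (List Char)
  | 0, _, res => res
  | fuel + 1, stack, res =>
    match stack with
    | [] => res
    | s :: rest =>
      if s.contains '(' = false then pvLoopBF fuel rest (res ++ [s])
      else pvLoopBF fuel (pvChildrenB s ++ rest) res

def parenthetical_possibilities_alt (string : String) : List String :=
  (pvLoopBF (2 ^ (string.toList.length + 1)) [string.toList] []).map String.ofList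

-- ===== PRECONDITION & SPEC =====
-- Pre_ is the exact no-crash condition of A: a single left-to-right parenthesis-validity scan
-- (A raises NameError when its scan leaves `start` or `end` unbound at some recursion depth).
def pvPreScan : List Char → Nat → Nat → Nat → Option Char → Bool
  | [], O, _, closes, _ => O == closes
  | c :: cs, O, opens, closes, prev =>
    if c == ')' then
      if O == closes then true
      else if opens < closes + 1 then false
      else if prev == some '(' then true
      else pvPreScan cs O opens (closes + 1) (some c)
    else if c == '(' then pvPreScan cs O (opens + 1) closes (some c)
    else pvPreScan cs O opens closes (some c)

def Pre_parenthetical_possibilities (string : String) : Prop :=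
  pvPreScan string.toList (string.toList.count '(') 0 0 none = true
instance (string : String) : Decidable (Pre_parenthetical_possibilities string) := by
  unfold Pre_parenthetical_possibilities; infer_instance

def pvWitness_parenthetical_possibilities : String := "(ab)c(de)"

def Spec_parenthetical_possibilities (string : String) (out : List String) : Prop := out = parenthetical_possibilities_alt string
instance (string : String) (out : List String) : Decidable (Spec_parenthetical_possibilities string out) := by unfold Spec_parenthetical_possibilities; infer_instance

-- ===== CLAIM (what is proved, stated in full; the proofs are below) =====
def Claim_equal_parenthetical_possibilities : Prop := ∀ (string : String), Dom_parenthetical_possibilities string → Pre_parenthetical_possibilities string → Spec_parenthetical_possibilities string (parenthetical_possibilities string)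

-- ===== LEMMAS AND PROOFS =====

-- A's recursion with the canonical (always sufficient) fuel
def pvA (l : List Char) : List (List Char) := pvPossAF (l.length + 1) l

-- bounds of A's scan
theorem pvFindA_bounds : ∀ (l : List Char) (i : Nat) (st0 : Option Nat) (st en : Nat),
    (∀ k, st0 = some k → k < i) → pvFindA l i st0 = (some st, some en) →
    st < en ∧ i ≤ en ∧ en < i + l.length := by
  intro l
  induction l with
  | nil => intro i st0 st en _ h; simp [pvFindA] at h
  | cons c cs ih =>
    intro i st0 st en hst h
    by_cases hc : c = '('
    · simp [pvFindA, hc] at h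
      have := ih (i + 1) (some i) st en (by intro k hk; cases hk; omega) h
      simp; omega
    · by_cases hc2 : c = ')'
      · simp [pvFindA, hc2] at h
        obtain ⟨h1, h2⟩ := h
        have := hst st (by rw [h1])
        simp; omega
      · simp [pvFindA, hc, hc2] at h
        have := ih (i + 1) st0 st en (by intro k hk; exact Nat.lt_succ_of_lt (hst k hk)) h
        simp; omega

-- the new string is strictly shorter than l
theorem pvDecA (l : List Char) (st en : Nat) (hf : pvFindA l 0 none = (some st, some en))
    (letter : Char) :
    (PySem.List.slice l none (some (st : Int)) ++ [letter] ++
      PySem.List.slice l (some ((en : Int) + 1)) none).length < l.length := by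
  have hb := pvFindA_bounds l 0 none st en (by intro k hk; cases hk) hf
  have h2 : ((en : Int) + 1) = ((en + 1 : Nat) : Int) := by push_cast; ring
  rw [h2, PySem.List.slice_to_natCast, PySem.List.slice_from_natCast]
  simp
  omega

-- the one-step equation of the fuelled recursion
theorem pvPossAF_succ (fuel : Nat) (l : List Char) :
    pvPossAF (fuel + 1) l =
      (if l.contains '(' = false then [l]
       else
         match pvFindA l 0 none with
         | (some st, some en) =>
           ((PySem.List.slice l (some ((st : Int) + 1)) (some (en : Int))).map
             (fun letter =>
               pvPossAF fuel (PySem.List.slice l none (some (st : Int)) ++ [letter] ++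
                              PySem.List.slice l (some ((en : Int) + 1)) none))).flatten
         | _ => []) := rfl

-- any fuel above the length computes A's recursion
theorem pvPossAF_stable : ∀ (fuel : Nat) (l : List Char), l.length < fuel →
    pvPossAF fuel l = pvA l := by
  intro fuel
  induction fuel using Nat.strong_induction_on with
  | _ fuel ih =>
    intro l hl
    match fuel, hl with
    | f + 1, hl =>
      unfold pvA
      rw [pvPossAF_succ, pvPossAF_succ]
      by_cases hc : l.contains '(' = false
      · rw [if_pos hc, if_pos hc]
      · rw [if_neg hc, if_neg hc]
        rcases hfa : pvFindA l 0 none with ⟨sto, eno⟩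
        rcases sto with _ | st <;> rcases eno with _ | en <;> simp only []
        congr 1
        apply List.map_congr_left
        intro letter _
        have hlen := pvDecA l st en hfa letter
        rw [ih f (by omega) _ (by omega), ih l.length (by omega) _ (by omega)]

-- constant-shape sum, for the loop's fuel bound
theorem pvSumPow (xs p q : List Char) :
    ((xs.map (fun c => p ++ [c] ++ q)).map (fun l => 2 ^ l.length)).sum
      = xs.length * 2 ^ (p.length + 1 + q.length) := by
  induction xs with
  | nil => simp
  | cons c cs ih => simp at ih ⊢; rw [ih]; ring

-- one expansion step strictly decreases the stack's 2^length sum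
theorem pvDecB2 (s : List Char) (rest : List (List Char)) :
    (((pvChildrenB s ++ rest).map (fun l => 2 ^ l.length)).sum : Nat)
      < (((s :: rest).map (fun l => 2 ^ l.length)).sum : Nat) := by
  unfold pvChildrenB
  split
  · simp
  · rename_i en hf
    split
    · simp
    · rename_i k hr
      have hen : en < s.length := by
        rw [List.idxOf?_eq_some_iff] at hf; obtain ⟨h1, -⟩ := hf; omega
      have hk : k < en := by
        rw [List.idxOf?_eq_some_iff] at hr; obtain ⟨h1, -⟩ := hr; simp at h1; omega
      rw [List.map_append, List.sum_append, pvSumPow, List.map_cons, List.sum_cons]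
      have hlen : (List.take (en - (en - 1 - k + 1)) (List.drop (en - 1 - k + 1) s)).length
          = k := by simp; omega
      have hlp : (List.take (en - 1 - k) s).length = en - 1 - k := by simp; omega
      have hlq : (List.drop (en + 1) s).length = s.length - (en + 1) := by simp
      rw [hlen, hlp, hlq]
      have hexp : en - 1 - k + 1 + (s.length - (en + 1)) = s.length - (k + 1) := by omega
      rw [hexp]
      have hkey : k * 2 ^ (s.length - (k + 1)) < 2 ^ s.length := by
        calc k * 2 ^ (s.length - (k + 1))
            < 2 ^ (k + 1) * 2 ^ (s.length - (k + 1)) := by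
              exact (Nat.mul_lt_mul_right (Nat.two_pow_pos _)).mpr
                (lt_of_le_of_lt (Nat.le_succ k) Nat.lt_two_pow_self)
          _ = 2 ^ s.length := by rw [← pow_add]; congr 1; omega
      omega

-- the value A's scan keeps in `start`: the last '(' of the scanned part (st0 = initial value)
def pvLastO : List Char → Nat → Option Nat → Option Nat
  | [], _, st0 => st0
  | c :: cs, i, st0 => if c = '(' then pvLastO cs (i + 1) (some i) else pvLastO cs (i + 1) st0

theorem pvFindA_no_close : ∀ (l : List Char) (i : Nat) (st0 : Option Nat),
    ')' ∉ l → pvFindA l i st0 = (pvLastO l i st0, none) := by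
  intro l
  induction l with
  | nil => intro i st0 _; rfl
  | cons c cs ih =>
    intro i st0 h
    simp at h
    have hcc : ¬ c = ')' := fun hh => h.1 hh.symm
    by_cases hc : c = '(' <;> simp [pvFindA, pvLastO, hc, hcc, ih _ _ h.2]

theorem pvFindA_split : ∀ (pre post : List Char) (i : Nat) (st0 : Option Nat), ')' ∉ pre →
    pvFindA (pre ++ ')' :: post) i st0 = (pvLastO pre i st0, some (i + pre.length)) := by
  intro pre
  induction pre with
  | nil => intro post i st0 _; simp [pvFindA, pvLastO]
  | cons c cs ih =>
    intro post i st0 h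
    simp at h
    have hcc : ¬ c = ')' := fun hh => h.1 hh.symm
    by_cases hc : c = '(' <;>
      · simp [pvFindA, pvLastO, hc, hcc, ih post _ _ h.2]
        omega

theorem pvLastO_append : ∀ (ys : List Char) (c : Char) (i : Nat) (st0 : Option Nat),
    pvLastO (ys ++ [c]) i st0 = if c = '(' then some (i + ys.length) else pvLastO ys i st0 := by
  intro ys
  induction ys with
  | nil => intro c i st0; simp [pvLastO]
  | cons y ys ih =>
    intro c i st0
    by_cases hy : y = '(' <;> by_cases hc : c = '(' <;>
      simp [pvLastO, hy, hc, ih] <;> omega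

theorem pvRev_lastO : ∀ (pre : List Char) (i : Nat) (st0 : Option Nat),
    pvLastO pre i st0 = (match pre.reverse.idxOf? '(' with
      | none => st0
      | some k => some (i + (pre.length - 1 - k))) := by
  intro pre
  induction pre using List.reverseRecOn with
  | nil => intro i st0; simp [pvLastO]
  | append_singleton ys c ih =>
    intro i st0
    rw [pvLastO_append]
    by_cases hc : c = '('
    · simp [hc, List.idxOf?_cons]
    · simp [hc, List.idxOf?_cons]
      rw [ih]
      rcases h : List.idxOf? '(' ys.reverse with _ | k
      · simp
      · simp
        omega

theorem pvIdx_split (l : List Char) (c : Char) (en : Nat) (h : l.idxOf? c = some en) :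
    l = l.take en ++ c :: l.drop (en + 1) ∧ c ∉ l.take en := by
  rw [List.idxOf?_eq_some_iff] at h
  obtain ⟨hlt, hget, hbefore⟩ := h
  constructor
  · conv_lhs => rw [← List.take_append_drop en l]
    rw [List.drop_eq_getElem_cons hlt, hget]
  · intro hmem
    rw [List.mem_iff_getElem] at hmem
    obtain ⟨j, hj, hval⟩ := hmem
    have hjlen : j < en := by simp at hj; omega
    rw [List.getElem_take] at hval
    exact hbefore j hjlen hval

theorem pvPossA_leaf (s : List Char) (hc : s.contains '(' = false) : pvA s = [s] := by
  unfold pvA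
  rw [pvPossAF_succ, if_pos hc]

theorem pvPossA_junk_noclose (s : List Char) (hc : s.contains '(' = true)
    (hf : s.idxOf? ')' = none) : pvA s = [] := by
  have hmem : ')' ∉ s := by simpa using List.idxOf?_eq_none_iff.mp hf
  unfold pvA
  rw [pvPossAF_succ, if_neg (by rw [hc]; simp), pvFindA_no_close s 0 none hmem]
  split
  · rename_i st' en' heq
    exact absurd (congrArg Prod.snd heq) (by simp)
  · rfl

theorem pvPossA_junk_noopen (s : List Char) (en : Nat) (hc : s.contains '(' = true)
    (hf : s.idxOf? ')' = some en)
    (hr : (s.take en).reverse.idxOf? '(' = none) : pvA s = [] := by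
  obtain ⟨hsplit, hnot⟩ := pvIdx_split s ')' en hf
  have hfa : pvFindA s 0 none = (none, some (0 + (s.take en).length)) := by
    conv_lhs => rw [hsplit]
    rw [pvFindA_split _ _ _ _ hnot, pvRev_lastO, hr]
  unfold pvA
  rw [pvPossAF_succ, if_neg (by rw [hc]; simp), hfa]

theorem pvPossA_expand (s : List Char) (en k : Nat)
    (hc : s.contains '(' = true)
    (hf : s.idxOf? ')' = some en)
    (hr : (s.take en).reverse.idxOf? '(' = some k) :
    pvA s =
      ((((s.drop (en - 1 - k + 1)).take (en - (en - 1 - k + 1))).map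
        (fun letter => s.take (en - 1 - k) ++ [letter] ++ s.drop (en + 1))).map pvA).flatten := by
  have hen : en < s.length := by
    rw [List.idxOf?_eq_some_iff] at hf; obtain ⟨h1, -⟩ := hf; omega
  have hk : k < en := by
    have hr' := hr
    rw [List.idxOf?_eq_some_iff] at hr'; obtain ⟨h1, -⟩ := hr'; simp at h1; omega
  have hlen : (s.take en).length = en := by simp; omega
  obtain ⟨hsplit, hnot⟩ := pvIdx_split s ')' en hf
  have hfa : pvFindA s 0 none = (some (en - 1 - k), some en) := by
    conv_lhs => rw [hsplit]
    rw [pvFindA_split _ _ _ _ hnot, pvRev_lastO, hr, hlen]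
    simp
  unfold pvA
  rw [pvPossAF_succ, if_neg (by rw [hc]; simp)]
  split
  · rename_i st' en' heq
    rw [hfa] at heq
    rw [Prod.mk.injEq] at heq
    obtain ⟨h1, h2⟩ := heq
    injection h1 with h1; injection h2 with h2
    subst h1; subst h2
    have e1 : ((en - 1 - k : Nat) : Int) + 1 = (((en - 1 - k) + 1 : Nat) : Int) := by push_cast; ring
    have e2 : ((en : Nat) : Int) + 1 = ((en + 1 : Nat) : Int) := by push_cast; ring
    rw [e1, e2, PySem.List.slice_natCast, PySem.List.slice_to_natCast, PySem.List.slice_from_natCast]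
    rw [List.map_map]
    congr 1
    apply List.map_congr_left
    intro letter _
    have hchild : (s.take (en - 1 - k) ++ [letter] ++ s.drop (en + 1)).length < s.length := by
      simp; omega
    simp only [Function.comp]
    rw [pvPossAF_stable s.length _ (by omega)]
    rfl
  · rename_i hne
    exact absurd hfa (by intro h; exact hne _ _ h)

theorem pvPossA_children (s : List Char) (hc : s.contains '(' = true) :
    pvA s = ((pvChildrenB s).map pvA).flatten := by
  unfold pvChildrenB
  split
  · simp [pvPossA_junk_noclose s hc (by assumption)]
  · rename_i en hf
    split
    · simp [pvPossA_junk_noopen s en hc hf (by assumption)]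
    · rename_i k hr
      exact pvPossA_expand s en k hc hf hr

theorem pvLoopB_eq : ∀ (fuel : Nat) (stack res : List (List Char)),
    (stack.map (fun l => 2 ^ l.length)).sum < fuel →
    pvLoopBF fuel stack res = res ++ (stack.map pvA).flatten := by
  intro fuel
  induction fuel with
  | zero => intro stack res h; omega
  | succ f ih =>
    intro stack res h
    match stack with
    | [] => simp [pvLoopBF]
    | s :: rest =>
      rw [pvLoopBF]
      by_cases hc : s.contains '(' = false
      · rw [if_pos hc]
        rw [ih rest (res ++ [s]) (by simp at h ⊢; have := Nat.one_le_two_pow (n := s.length); omega)]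
        simp [pvPossA_leaf s hc]
      · rw [if_neg hc]
        have hdec := pvDecB2 s rest
        rw [ih (pvChildrenB s ++ rest) res (by omega)]
        simp only [List.map_cons, List.flatten_cons]
        rw [pvPossA_children s (by simpa using hc)]
        simp

-- ===== VERDICT (by name: the statement is the Claim_ definition above) =====
theorem parenthetical_possibilities_spec : Claim_equal_parenthetical_possibilities := by
  intro s _ _
  unfold Spec_parenthetical_possibilities parenthetical_possibilities parenthetical_possibilities_alt
  rw [pvLoopB_eq (2 ^ (s.toList.length + 1)) [s.toList] []
    (by simp; exact Nat.pow_lt_pow_right (by omega) (by omega))]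
  simp [pvA]
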